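-- pv_equiv track=rewrite | github.com/manizzle/oombra | vigil/secagg.py | shamir_reconstruct
-- ===== SOURCE A (Python) =====
-- _PRIME = 2**127 - 1  # Mersenne prime M127
--
-- def _mod_inverse(a: int, p: int) -> int:
--     """Modular inverse using extended Euclidean algorithm."""
--     if a < 0:
--         a = a % p
--     g, x, _ = _extended_gcd(a, p)
--     if g != 1:
--         raise ValueError("Modular inverse does not exist")
--     return x % p
--
-- def _extended_gcd(a: int, b: int) -> tuple[int, int, int]:
--     if a == 0:
--         return b, 0, 1
--     g, x, y = _extended_gcd(b % a, a)
--     return g, y - (b // a) * x, x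
--
-- def shamir_reconstruct(shares: list[tuple[int, int]]) -> int:
--     """
--     Reconstruct the secret from threshold or more shares.
--     Uses Lagrange interpolation at x=0.
--     """
--     if not shares:
--         raise ValueError("Need at least one share")
--
--     secret = 0
--     for i, (xi, yi) in enumerate(shares):
--         # Lagrange basis polynomial evaluated at x=0
--         num = 1
--         den = 1
--         for j, (xj, _) in enumerate(shares):
--             if i != j:
--                 num = (num * (-xj)) % _PRIME
--                 den = (den * (xi - xj)) % _PRIME
--         lagrange = (yi * num * _mod_inverse(den, _PRIME)) % _PRIME
--         secret = (secret + lagrange) % _PRIME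
--     return secret
-- ===== SOURCE B (Python) =====
-- _PRIME = 2**127 - 1  # Mersenne prime M127
--
-- def _mod_inverse(a: int, p: int) -> int:
--     """Modular inverse via the ITERATIVE extended Euclidean algorithm."""
--     if a < 0:
--         a = a % p
--     old_r, r = a, p
--     old_s, s = 1, 0
--     while r:
--         q = old_r // r
--         old_r, r = r, old_r - q * r
--         old_s, s = s, old_s - q * s
--     if old_r != 1:
--         raise ValueError("Modular inverse does not exist")
--     return old_s % p
--
-- def shamir_reconstruct(shares: list[tuple[int, int]]) -> int:
--     """
--     Reconstruct the secret from threshold or more shares (Lagrange at x=0),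
--     using Montgomery batch inversion: the numerators and denominators of all
--     Lagrange terms are stored, a prefix-product table of the denominators is
--     built, ONE modular inverse of the total product is taken, and each
--     inverse denominator is then recovered by walking the table backwards
--     with multiplications only.
--     """
--     if not shares:
--         raise ValueError("Need at least one share")
--
--     nums, dens = [], []
--     for i, (xi, yi) in enumerate(shares):
--         num = 1
--         den = 1
--         for j, (xj, _) in enumerate(shares):
--             if i != j:
--                 num = num * (-xj) % _PRIME
--                 den = den * (xi - xj) % _PRIME
--         nums.append(num)
--         dens.append(den)
--
--     prefix = [1]
--     for d in dens:
--         prefix.append(prefix[-1] * d % _PRIME)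
--
--     inv_total = _mod_inverse(prefix[-1], _PRIME)
--
--     secret = 0
--     for (xy, num, den, pre) in reversed(list(zip(shares, nums, dens, prefix))):
--         inv_den = inv_total * pre % _PRIME
--         inv_total = inv_total * den % _PRIME
--         secret = (secret + xy[1] * num * inv_den) % _PRIME
--     return secret
-- ===== Notes on version B (the rewrite author's own statement) =====
-- stated objective: alternative
-- what changed: Instead of one extended-gcd modular inverse per share, B stores each term's numerator and denominator, builds a prefix-product table of the denominators, takes a SINGLE modular inverse of the total product, and walks the table backwards recovering every inverse denominator with multiplications only (Montgomery batch inversion).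
import Mathlib
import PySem

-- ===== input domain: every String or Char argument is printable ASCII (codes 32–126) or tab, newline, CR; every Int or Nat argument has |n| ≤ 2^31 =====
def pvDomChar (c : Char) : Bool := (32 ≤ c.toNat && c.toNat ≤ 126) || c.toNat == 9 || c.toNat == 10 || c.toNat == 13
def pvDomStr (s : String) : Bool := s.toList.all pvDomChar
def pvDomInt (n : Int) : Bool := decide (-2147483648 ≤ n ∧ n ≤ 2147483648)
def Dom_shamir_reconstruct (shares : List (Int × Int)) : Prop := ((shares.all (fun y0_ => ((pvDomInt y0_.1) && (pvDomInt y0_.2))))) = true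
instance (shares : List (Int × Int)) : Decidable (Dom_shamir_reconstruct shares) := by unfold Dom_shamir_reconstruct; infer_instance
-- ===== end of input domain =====

-- B replaces A's n independent extended-gcd inversions by ONE inversion of the product of all
-- denominators plus a prefix-product table walked backwards (Montgomery batch inversion);
-- objective: alternative decomposition (constant-factor: one egcd instead of n).

-- _PRIME = 2**127 - 1
def pvP : Int := 170141183460469231731687303715884105727

-- termination helper for the extended-gcd recursion (cited by pvEgcd's decreasing_by)
lemma pvMod_natAbs_lt (b a : Int) (h : ¬ a = 0) : (PySem.Int.mod b a).natAbs < a.natAbs := by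
  rcases lt_or_gt_of_ne h with hneg | hpos
  · have h1 := PySem.Int.mod_neg_bounds (a := b) hneg
    omega
  · have h1 := PySem.Int.mod_nonneg (a := b) hpos
    have h2 := PySem.Int.mod_lt (a := b) hpos
    omega

-- ===== PORT A =====
-- port of _extended_gcd (shared module helper, used by both Pythons' _mod_inverse)
def pvEgcd (a b : Int) : Int × Int × Int :=
  if a = 0 then (b, 0, 1)
  else
    let r := pvEgcd (PySem.Int.mod b a) a
    (r.1, r.2.2 - PySem.Int.floordiv b a * r.2.1, r.2.1)
termination_by a.natAbs
decreasing_by exact pvMod_natAbs_lt b a (by assumption)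

-- port of _mod_inverse; none = the ValueError branch (raise)
def pvModInverse (a p : Int) : Option Int :=
  let a' := if a < 0 then PySem.Int.mod a p else a
  let r := pvEgcd a' p
  if r.1 ≠ 1 then none else some (PySem.Int.mod r.2.1 p)

-- A raises ValueError on [] and when _mod_inverse fails; the port returns 0 there (outside Pre_)
def shamir_reconstruct (shares : List (Int × Int)) : Int :=
  if shares = [] then 0
  else
    ((PySem.List.enumerate shares 0).foldl
      (fun (acc : Option Int) iv =>
        match acc with
        | none => none
        | some secret =>
          let nd := (PySem.List.enumerate shares 0).foldl
            (fun (nd : Int × Int) jv =>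
              if iv.1 ≠ jv.1 then
                (PySem.Int.mod (nd.1 * (-jv.2.1)) pvP, PySem.Int.mod (nd.2 * (iv.2.1 - jv.2.1)) pvP)
              else nd) (1, 1)
          match pvModInverse nd.2 pvP with
          | none => none
          | some inv => some (PySem.Int.mod (secret + PySem.Int.mod (iv.2.2 * nd.1 * inv) pvP) pvP))
      (some 0)).getD 0

-- ===== PORT B =====
-- termination helper for the iterative extended-gcd loop (cited by pvEgcdIter's decreasing_by)
lemma pvIterStep_natAbs_lt (old_r r : Int) (h : ¬ r = 0) :
    (old_r - PySem.Int.floordiv old_r r * r).natAbs < r.natAbs := by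
  have hm : old_r - PySem.Int.floordiv old_r r * r = PySem.Int.mod old_r r := by
    have := PySem.Int.floordiv_mul_add_mod old_r r
    linarith
  rw [hm]
  exact pvMod_natAbs_lt old_r r h

-- Source B's iterative extended-Euclid loop (while r: ...), state (old_r, r, old_s, s)
def pvEgcdIter (old_r r old_s s : Int) : Int × Int :=
  if r = 0 then (old_r, old_s)
  else
    let q := PySem.Int.floordiv old_r r
    pvEgcdIter r (old_r - q * r) s (old_s - q * s)
termination_by r.natAbs
decreasing_by exact pvIterStep_natAbs_lt old_r r (by assumption)

-- Source B's _mod_inverse; none = the ValueError branch (raise)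
def pvModInverseB (a p : Int) : Option Int :=
  let a' := if a < 0 then PySem.Int.mod a p else a
  let gs := pvEgcdIter a' p 1 0
  if gs.1 ≠ 1 then none else some (PySem.Int.mod gs.2 p)

-- Source B: store all numerators/denominators, build a prefix-product table, take ONE inverse of
-- the total product, then walk the zipped lists in reverse recovering each inverse denominator.
-- (Python's 4-tuples from zip(shares, nums, dens, prefix) are the nested pairs ((xy,num),(den,pre)).)
def shamir_reconstruct_alt (shares : List (Int × Int)) : Int :=
  if shares = [] then 0
  else
    let numsdens := (PySem.List.enumerate shares 0).foldl
      (fun (nd : List Int × List Int) iv =>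
        let p := (PySem.List.enumerate shares 0).foldl
          (fun (p : Int × Int) jv =>
            if iv.1 ≠ jv.1 then
              (PySem.Int.mod (p.1 * (-jv.2.1)) pvP, PySem.Int.mod (p.2 * (iv.2.1 - jv.2.1)) pvP)
            else p) (1, 1)
        (nd.1 ++ [p.1], nd.2 ++ [p.2])) ([], [])
    let dens := numsdens.2
    let prefix_ := dens.foldl
      (fun (pr : List Int) d => pr ++ [PySem.Int.mod (PySem.List.pyGetD pr (-1) 0 * d) pvP]) [1]
    match pvModInverseB (PySem.List.pyGetD prefix_ (-1) 0) pvP with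
    | none => 0
    | some invT =>
      (((shares.zip numsdens.1).zip (dens.zip prefix_)).reverse.foldl
        (fun (st : Int × Int) q =>
          let invden := PySem.Int.mod (st.1 * q.2.2) pvP
          (PySem.Int.mod (st.1 * q.2.1) pvP,
           PySem.Int.mod (st.2 + q.1.1.2 * q.1.2 * invden) pvP))
        (invT, 0)).2

-- ===== PRECONDITION & SPEC =====
-- Pre_ excludes exactly the inputs where A raises ValueError: the empty list, and duplicate
-- x-coordinates (there a zero denominator makes _mod_inverse fail).
def Pre_shamir_reconstruct (shares : List (Int × Int)) : Prop :=
  shares ≠ [] ∧ (shares.map Prod.fst).Nodup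
instance (shares : List (Int × Int)) : Decidable (Pre_shamir_reconstruct shares) := by
  unfold Pre_shamir_reconstruct; infer_instance

def pvWitness_shamir_reconstruct : (List (Int × Int)) := [(1, 5), (2, 9), (3, 15)]

def Spec_shamir_reconstruct (shares : List (Int × Int)) (out : Int) : Prop := out = shamir_reconstruct_alt shares
instance (shares : List (Int × Int)) (out : Int) : Decidable (Spec_shamir_reconstruct shares out) := by unfold Spec_shamir_reconstruct; infer_instance

-- ===== CLAIM (what is proved, stated in full; the proofs are below) =====
def Claim_equal_shamir_reconstruct : Prop := ∀ (shares : List (Int × Int)), Dom_shamir_reconstruct shares → Pre_shamir_reconstruct shares → Spec_shamir_reconstruct shares (shamir_reconstruct shares)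


-- ===== LEMMAS AND PROOFS =====

def pvNP : Nat := 170141183460469231731687303715884105727

lemma pvNP_prime : Nat.Prime pvNP := by
  have h : mersenne 127 = pvNP := by norm_num [mersenne, pvNP]
  exact h ▸ lucas_lehmer_sufficiency 127 (by norm_num) (by norm_num)

lemma pvP_pos : (0:Int) < pvP := by norm_num [pvP]

lemma pvmodP (x : Int) : PySem.Int.mod x pvP = x % pvP :=
  PySem.Int.mod_eq_emod_of_pos pvP_pos

lemma pvP_prime_int : Prime pvP := by
  have h : pvP = ((pvNP : Nat) : Int) := by norm_num [pvP, pvNP]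
  rw [h]
  exact_mod_cast Nat.prime_iff_prime_int.mp pvNP_prime

lemma pvdvd_emod (x : Int) : pvP ∣ x % pvP ↔ pvP ∣ x := by
  constructor <;> intro h
  · have hx : x = x % pvP + pvP * (x / pvP) := by rw [Int.emod_def]; ring
    rw [hx]; exact dvd_add h (dvd_mul_right _ _)
  · have hx : x % pvP = x - pvP * (x / pvP) := by rw [Int.emod_def]
    rw [hx]; exact dvd_sub h (dvd_mul_right _ _)

lemma pv_nondvd_mul {a b : Int} (ha : ¬ pvP ∣ a) (hb : ¬ pvP ∣ b) : ¬ pvP ∣ a * b := by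
  intro h
  rcases (pvP_prime_int.dvd_mul).mp h with h' | h'
  · exact ha h'
  · exact hb h'

lemma pvEgcd_bezout (a b : Int) :
    a * (pvEgcd a b).2.1 + b * (pvEgcd a b).2.2 = (pvEgcd a b).1 := by
  fun_induction pvEgcd a b with
  | case1 b => simp
  | case2 a b h r ih =>
    have hr : r = pvEgcd (PySem.Int.mod b a) a := rfl
    rw [hr]
    dsimp only
    linear_combination ih - (pvEgcd (PySem.Int.mod b a) a).2.1 * PySem.Int.floordiv_mul_add_mod b a

lemma pvEgcd_pos_dvd (a b : Int) : 0 ≤ a → 0 < b →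
    0 < (pvEgcd a b).1 ∧ (pvEgcd a b).1 ∣ a ∧ (pvEgcd a b).1 ∣ b := by
  fun_induction pvEgcd a b with
  | case1 b => intro _ hb; exact ⟨hb, dvd_zero _, dvd_refl _⟩
  | case2 a b h r ih =>
    intro ha hb
    have hapos : 0 < a := lt_of_le_of_ne ha (Ne.symm h)
    obtain ⟨h1, h2, h3⟩ := ih (PySem.Int.mod_nonneg (a := b) hapos) hapos
    have hr : r = pvEgcd (PySem.Int.mod b a) a := rfl
    rw [hr]
    dsimp only
    refine ⟨h1, h3, ?_⟩
    have hd : (pvEgcd (PySem.Int.mod b a) a).1 ∣ PySem.Int.floordiv b a * a + PySem.Int.mod b a :=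
      dvd_add (h3.mul_left _) h2
    rwa [PySem.Int.floordiv_mul_add_mod] at hd

lemma pvModInverse_spec (a : Int) (ha : 0 ≤ a) (hnd : ¬ pvP ∣ a) :
    ∃ v, pvModInverse a pvP = some v ∧ 0 ≤ v ∧ v < pvP ∧ (a * v) % pvP = 1 := by
  obtain ⟨hg, hga, hgp⟩ := pvEgcd_pos_dvd a pvP ha pvP_pos
  have hg1 : (pvEgcd a pvP).1 = 1 := by
    have hdvd : (pvEgcd a pvP).1.natAbs ∣ pvNP := by
      have h := Int.natAbs_dvd_natAbs.mpr hgp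
      simpa [pvP, pvNP] using h
    rcases Nat.Prime.eq_one_or_self_of_dvd pvNP_prime _ hdvd with h1 | h1
    · omega
    · exfalso
      apply hnd
      have h2 : (pvEgcd a pvP).1.natAbs = (170141183460469231731687303715884105727 : Nat) := by
        simpa [pvNP] using h1
      have h3 : (pvEgcd a pvP).1 = pvP := by
        have h4 : (0:Int) < (pvEgcd a pvP).1 := hg
        have h5 : pvP = (170141183460469231731687303715884105727 : Int) := rfl
        omega
      rw [h3] at hga
      exact hga
  have hnot : ¬ a < 0 := not_lt.mpr ha
  refine ⟨(pvEgcd a pvP).2.1 % pvP, ?_,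
    Int.emod_nonneg _ (by norm_num [pvP]), Int.emod_lt_of_pos _ pvP_pos, ?_⟩
  · simp [pvModInverse, hnot, hg1, pvmodP]
  · have hb := pvEgcd_bezout a pvP
    rw [hg1] at hb
    have h1 : (a * ((pvEgcd a pvP).2.1 % pvP)) % pvP = (a * (pvEgcd a pvP).2.1) % pvP := by
      conv_lhs => rw [Int.mul_emod]
      conv_rhs => rw [Int.mul_emod]
      rw [Int.emod_emod_of_dvd _ dvd_rfl]
    rw [h1]
    have h2 : a * (pvEgcd a pvP).2.1 = 1 - pvP * (pvEgcd a pvP).2.2 := by linarith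
    rw [h2, Int.sub_emod, Int.mul_emod_right]
    norm_num [pvP]

lemma pvInv_unique (d u v : Int) (hu0 : 0 ≤ u) (hu1 : u < pvP) (hv0 : 0 ≤ v) (hv1 : v < pvP)
    (hu : (d * u) % pvP = 1) (hv : (d * v) % pvP = 1) : u = v := by
  have kem : ∀ x : Int, 0 ≤ x → x < pvP → x % pvP = x := fun x h1 h2 => Int.emod_eq_of_lt h1 h2
  have h1 : (u * (d * v)) % pvP = u := by
    rw [Int.mul_emod, hv, mul_one, Int.emod_emod_of_dvd _ dvd_rfl, kem u hu0 hu1]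
  have h2 : (v * (d * u)) % pvP = v := by
    rw [Int.mul_emod, hu, mul_one, Int.emod_emod_of_dvd _ dvd_rfl, kem v hv0 hv1]
  have h3 : u * (d * v) = v * (d * u) := by ring
  rw [← h1, h3, h2]



-- modular-arithmetic helper rewrites
lemma pvmulmod_left (a b : Int) : (a % pvP * b) % pvP = (a * b) % pvP := by
  rw [Int.mul_emod, Int.emod_emod_of_dvd _ dvd_rfl, ← Int.mul_emod]

lemma pvmulmod_right (a b : Int) : (a * (b % pvP)) % pvP = (a * b) % pvP := by
  rw [Int.mul_emod, Int.emod_emod_of_dvd _ dvd_rfl, ← Int.mul_emod]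

lemma pvaddmod_right (a b : Int) : (a + b % pvP) % pvP = (a + b) % pvP := by
  rw [Int.add_emod, Int.emod_emod_of_dvd _ dvd_rfl, ← Int.add_emod]

lemma pvaddmod_left (a b : Int) : (a % pvP + b) % pvP = (a + b) % pvP := by
  rw [Int.add_emod, Int.emod_emod_of_dvd _ dvd_rfl, ← Int.add_emod]


-- correctness of the iterative extended-gcd loop (B's _mod_inverse)
lemma pvEgcdIter_dvd : ∀ (old_r r old_s s : Int),
    (pvEgcdIter old_r r old_s s).1 ∣ old_r ∧ (pvEgcdIter old_r r old_s s).1 ∣ r := by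
  intro old_r r old_s s
  fun_induction pvEgcdIter old_r r old_s s with
  | case1 old_r old_s s => exact ⟨dvd_refl _, dvd_zero _⟩
  | case2 old_r r old_s s h q ih =>
    obtain ⟨h1, h2⟩ := ih
    refine ⟨?_, h1⟩
    have h3 : (pvEgcdIter r (old_r - q * r) s (old_s - q * s)).1 ∣ (old_r - q * r) + q * r :=
      dvd_add h2 (h1.mul_left _)
    simpa using h3

lemma pvEgcdIter_pos : ∀ (old_r r old_s s : Int), 0 ≤ old_r → 0 < r →
    0 < (pvEgcdIter old_r r old_s s).1 := by
  intro old_r r old_s s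
  fun_induction pvEgcdIter old_r r old_s s with
  | case1 old_r old_s h => intro h0 h1; omega
  | case2 old_r r old_s s h q ih =>
    intro h0 h1
    have hq : q = PySem.Int.floordiv old_r r := rfl
    have hm : old_r - q * r = PySem.Int.mod old_r r := by
      have := PySem.Int.floordiv_mul_add_mod old_r r
      rw [hq]; linarith
    have h0' : 0 ≤ old_r - q * r := by
      rw [hm]; exact PySem.Int.mod_nonneg _ h1
    by_cases hz : old_r - q * r = 0
    · rw [pvEgcdIter, if_pos hz]
      exact h1
    · exact ih h1.le (lt_of_le_of_ne h0' (Ne.symm hz))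

lemma pvEgcdIter_congr (A P0 : Int) : ∀ (old_r r old_s s : Int),
    old_s * A % P0 = old_r % P0 → s * A % P0 = r % P0 →
    (pvEgcdIter old_r r old_s s).2 * A % P0 = (pvEgcdIter old_r r old_s s).1 % P0 := by
  intro old_r r old_s s
  fun_induction pvEgcdIter old_r r old_s s with
  | case1 old_r old_s h => intro h1 _; exact h1
  | case2 old_r r old_s s h q ih =>
    intro h1 h2
    refine ih h2 ?_
    have e1 : Int.ModEq P0 (old_s * A) old_r := h1
    have e2 : Int.ModEq P0 (s * A) r := h2
    have e3 := e1.sub (e2.mul_left q)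
    have h4 : (old_s - q * s) * A = old_s * A - q * (s * A) := by ring
    show Int.ModEq P0 ((old_s - q * s) * A) (old_r - q * r)
    rw [h4]
    exact e3

lemma pvModInverseB_spec (a : Int) (ha : 0 ≤ a) (hnd : ¬ pvP ∣ a) :
    ∃ v, pvModInverseB a pvP = some v ∧ 0 ≤ v ∧ v < pvP ∧ (a * v) % pvP = 1 := by
  obtain ⟨hga, hgp⟩ := pvEgcdIter_dvd a pvP 1 0
  have hg : 0 < (pvEgcdIter a pvP 1 0).1 := pvEgcdIter_pos a pvP 1 0 ha pvP_pos
  have hg1 : (pvEgcdIter a pvP 1 0).1 = 1 := by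
    have hdvd : (pvEgcdIter a pvP 1 0).1.natAbs ∣ pvNP := by
      have h := Int.natAbs_dvd_natAbs.mpr hgp
      simpa [pvP, pvNP] using h
    rcases Nat.Prime.eq_one_or_self_of_dvd pvNP_prime _ hdvd with h1 | h1
    · omega
    · exfalso
      apply hnd
      have h2 : (pvEgcdIter a pvP 1 0).1.natAbs = (170141183460469231731687303715884105727 : Nat) := by
        simpa [pvNP] using h1
      have h3 : (pvEgcdIter a pvP 1 0).1 = pvP := by
        have h5 : pvP = (170141183460469231731687303715884105727 : Int) := rfl
        omega
      rw [h3] at hga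
      exact hga
  have hc := pvEgcdIter_congr a pvP a pvP 1 0 (by rw [one_mul]) (by simp)
  rw [hg1] at hc
  have hnot : ¬ a < 0 := not_lt.mpr ha
  refine ⟨(pvEgcdIter a pvP 1 0).2 % pvP, ?_,
    Int.emod_nonneg _ (by norm_num [pvP]), Int.emod_lt_of_pos _ pvP_pos, ?_⟩
  · simp [pvModInverseB, hnot, hg1, pvmodP]
  · rw [pvmulmod_right, mul_comm, hc]
    norm_num [pvP]

-- the inner Lagrange loop shared verbatim by both Pythons, as a function of one enumerate entry
def pvND (shares : List (Int × Int)) (iv : Int × (Int × Int)) : Int × Int :=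
  (PySem.List.enumerate shares 0).foldl
    (fun (nd : Int × Int) jv =>
      if iv.1 ≠ jv.1 then
        (PySem.Int.mod (nd.1 * (-jv.2.1)) pvP, PySem.Int.mod (nd.2 * (iv.2.1 - jv.2.1)) pvP)
      else nd) (1, 1)

def pvInvVal (d : Int) : Int := (pvModInverse d pvP).getD 0

def pvTerm (shares : List (Int × Int)) (iv : Int × (Int × Int)) : Int :=
  (iv.2.2 * (pvND shares iv).1 * pvInvVal (pvND shares iv).2) % pvP

-- A's outer loop, named for rewriting
def pvAstep (shares : List (Int × Int)) : Option Int → (Int × (Int × Int)) → Option Int :=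
  fun (acc : Option Int) iv =>
    match acc with
    | none => none
    | some secret =>
      let nd := (PySem.List.enumerate shares 0).foldl
        (fun (nd : Int × Int) jv =>
          if iv.1 ≠ jv.1 then
            (PySem.Int.mod (nd.1 * (-jv.2.1)) pvP, PySem.Int.mod (nd.2 * (iv.2.1 - jv.2.1)) pvP)
          else nd) (1, 1)
      match pvModInverse nd.2 pvP with
      | none => none
      | some inv => some (PySem.Int.mod (secret + PySem.Int.mod (iv.2.2 * nd.1 * inv) pvP) pvP)

lemma pvA_eq (shares : List (Int × Int)) (h : ¬ shares = []) :
    shamir_reconstruct shares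
      = ((PySem.List.enumerate shares 0).foldl (pvAstep shares) (some 0)).getD 0 := by
  rw [shamir_reconstruct, if_neg h]
  rfl

lemma pvAstep_some (shares : List (Int × Int)) (s : Int) (iv : Int × (Int × Int)) :
    pvAstep shares (some s) iv
      = match pvModInverse (pvND shares iv).2 pvP with
        | none => none
        | some inv =>
            some ((s + (iv.2.2 * (pvND shares iv).1 * inv) % pvP) % pvP) := by
  show (match pvModInverse (pvND shares iv).2 pvP with
        | none => none
        | some inv =>
            some (PySem.Int.mod (s + PySem.Int.mod (iv.2.2 * (pvND shares iv).1 * inv) pvP) pvP)) = _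
  cases pvModInverse (pvND shares iv).2 pvP with
  | none => rfl
  | some v => simp [pvmodP]

lemma pvA_fold (shares : List (Int × Int)) (l : List (Int × (Int × Int)))
    (h : ∀ iv ∈ l, 0 ≤ (pvND shares iv).2 ∧ ¬ pvP ∣ (pvND shares iv).2) :
    ∀ s : Int,
      l.foldl (pvAstep shares) (some s)
        = some (l.foldl (fun s iv => (s + pvTerm shares iv) % pvP) s) := by
  induction l with
  | nil => intro s; rfl
  | cons x t ih =>
    intro s
    have hx := h x (List.mem_cons_self)
    obtain ⟨v, hv, hv0, hv1, hvinv⟩ := pvModInverse_spec _ hx.1 hx.2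
    have hstep : pvAstep shares (some s) x = some ((s + pvTerm shares x) % pvP) := by
      rw [pvAstep_some, hv]
      have hterm : pvTerm shares x = (x.2.2 * (pvND shares x).1 * v) % pvP := by
        rw [pvTerm, pvInvVal, hv]; rfl
      rw [hterm, pvaddmod_right, ← pvaddmod_right]
    rw [List.foldl_cons, List.foldl_cons, hstep]
    exact ih (fun iv hm => h iv (List.mem_cons_of_mem _ hm)) _

lemma pvfoldl_madd (L : List Int) : ∀ s : Int,
    L.foldl (fun a t => (a + t) % pvP) (s % pvP) = (s + L.sum) % pvP := by
  induction L with
  | nil => intro s; simp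
  | cons x t ih =>
    intro s
    rw [List.foldl_cons, pvaddmod_left, ih (s + x)]
    simp [add_assoc]

-- invariant of the inner Lagrange loop
lemma pvND_aux (i xi : Int) (l : List (Int × (Int × Int))) :
    ∀ p : Int × Int, 0 ≤ p.2 → p.2 < pvP → ¬ pvP ∣ p.2 →
    (∀ jv ∈ l, i ≠ jv.1 → ¬ pvP ∣ (xi - jv.2.1)) →
    (0 ≤ (l.foldl
        (fun (nd : Int × Int) jv =>
          if i ≠ jv.1 then
            (PySem.Int.mod (nd.1 * (-jv.2.1)) pvP, PySem.Int.mod (nd.2 * (xi - jv.2.1)) pvP)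
          else nd) p).2
      ∧ (l.foldl
        (fun (nd : Int × Int) jv =>
          if i ≠ jv.1 then
            (PySem.Int.mod (nd.1 * (-jv.2.1)) pvP, PySem.Int.mod (nd.2 * (xi - jv.2.1)) pvP)
          else nd) p).2 < pvP
      ∧ ¬ pvP ∣ (l.foldl
        (fun (nd : Int × Int) jv =>
          if i ≠ jv.1 then
            (PySem.Int.mod (nd.1 * (-jv.2.1)) pvP, PySem.Int.mod (nd.2 * (xi - jv.2.1)) pvP)
          else nd) p).2) := by
  induction l with
  | nil => intro p h0 h1 h2 _; exact ⟨h0, h1, h2⟩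
  | cons jv t ih =>
    intro p h0 h1 h2 hf
    rw [List.foldl_cons]
    by_cases hij : i ≠ jv.1
    · rw [if_pos hij]
      refine ih _ ?_ ?_ ?_ (fun kv hk => hf kv (List.mem_cons_of_mem _ hk))
      · exact PySem.Int.mod_nonneg _ pvP_pos
      · exact PySem.Int.mod_lt _ pvP_pos
      · dsimp only
        rw [pvmodP, pvdvd_emod]
        exact pv_nondvd_mul h2 (hf jv List.mem_cons_self hij)
    · rw [if_neg hij]
      exact ih _ h0 h1 h2 (fun kv hk => hf kv (List.mem_cons_of_mem _ hk))

lemma pvND_props (shares : List (Int × Int)) (iv : Int × (Int × Int))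
    (hfac : ∀ jv ∈ PySem.List.enumerate shares 0, iv.1 ≠ jv.1 → ¬ pvP ∣ (iv.2.1 - jv.2.1)) :
    0 ≤ (pvND shares iv).2 ∧ (pvND shares iv).2 < pvP ∧ ¬ pvP ∣ (pvND shares iv).2 := by
  have h := pvND_aux iv.1 iv.2.1 (PySem.List.enumerate shares 0) (1, 1)
    (by norm_num) (by norm_num [pvP]) (by norm_num [pvP]) hfac
  exact h

-- distinct x-coordinates within the domain bound give factors not divisible by the prime
lemma pv_factors (shares : List (Int × Int)) (hdom : Dom_shamir_reconstruct shares)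
    (hnodup : (shares.map Prod.fst).Nodup) :
    ∀ iv ∈ PySem.List.enumerate shares 0, ∀ jv ∈ PySem.List.enumerate shares 0,
      iv.1 ≠ jv.1 → ¬ pvP ∣ (iv.2.1 - jv.2.1) := by
  intro iv hiv jv hjv hne hdvd
  rw [PySem.List.mem_enumerate_iff] at hiv hjv
  obtain ⟨k, hk, rfl⟩ := hiv
  obtain ⟨m, hm, rfl⟩ := hjv
  have hkm : k ≠ m := by
    intro h; apply hne; simp [h]
  have hxne : shares[k].1 ≠ shares[m].1 := by
    intro h
    apply hkm
    have hnk : (shares.map Prod.fst)[k]'(by simpa using hk) = (shares.map Prod.fst)[m]'(by simpa using hm) := by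
      simpa using h
    exact (List.Nodup.getElem_inj_iff hnodup).mp hnk
  have hbk : -2147483648 ≤ shares[k].1 ∧ shares[k].1 ≤ 2147483648 := by
    have hmem := List.getElem_mem (l := shares) (n := k) hk
    have := (List.all_eq_true.mp hdom) _ hmem
    simp [pvDomInt] at this
    omega
  have hbm : -2147483648 ≤ shares[m].1 ∧ shares[m].1 ≤ 2147483648 := by
    have hmem := List.getElem_mem (l := shares) (n := m) hm
    have := (List.all_eq_true.mp hdom) _ hmem
    simp [pvDomInt] at this
    omega
  obtain ⟨c, hc⟩ := hdvd
  simp only at hc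
  rw [show pvP = (170141183460469231731687303715884105727 : Int) from rfl] at hc
  have hxx : shares[k].1 - shares[m].1 ≠ 0 := sub_ne_zero_of_ne hxne
  omega


lemma pvA_total (shares : List (Int × Int)) (hne : ¬ shares = [])
    (hnd : ∀ iv ∈ PySem.List.enumerate shares 0,
      0 ≤ (pvND shares iv).2 ∧ (pvND shares iv).2 < pvP ∧ ¬ pvP ∣ (pvND shares iv).2) :
    shamir_reconstruct shares
      = ((PySem.List.enumerate shares 0).map (pvTerm shares)).sum % pvP := by
  rw [pvA_eq shares hne,
    pvA_fold shares _ (fun iv hm => ⟨(hnd iv hm).1, (hnd iv hm).2.2⟩) 0]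
  have h0 : (0 : Int) = 0 % pvP := by norm_num
  rw [Option.getD_some, ← List.foldl_map (f := pvTerm shares)
      (g := fun s t => (s + t) % pvP), h0, pvfoldl_madd]
  norm_num

-- B-side proof helpers
def pvPres (c : Int) : List Int → List Int
  | [] => []
  | d :: ds => ((c * d) % pvP) :: pvPres ((c * d) % pvP) ds

def pvPI (c : Int) (D : List Int) : Int := D.foldl (fun a d => (a * d) % pvP) c

def pvQuad (c : Int) : List ((Int × Int) × Int × Int) → List (((Int × Int) × Int) × Int × Int)
  | [] => []
  | x :: t => ((x.1, x.2.1), (x.2.2, c)) :: pvQuad ((c * x.2.2) % pvP) t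

def pvTermOf (x : (Int × Int) × Int × Int) : Int := (x.1.2 * x.2.1 * pvInvVal x.2.2) % pvP

lemma pvB_build (shares : List (Int × Int)) (l : List (Int × (Int × Int))) :
    ∀ as bs : List Int,
      l.foldl (fun (nd : List Int × List Int) iv =>
        let p := (PySem.List.enumerate shares 0).foldl
          (fun (p : Int × Int) jv =>
            if iv.1 ≠ jv.1 then
              (PySem.Int.mod (p.1 * (-jv.2.1)) pvP, PySem.Int.mod (p.2 * (iv.2.1 - jv.2.1)) pvP)
            else p) (1, 1)
        (nd.1 ++ [p.1], nd.2 ++ [p.2])) (as, bs)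
      = (as ++ l.map (fun iv => (pvND shares iv).1), bs ++ l.map (fun iv => (pvND shares iv).2)) := by
  induction l with
  | nil => intro as bs; simp
  | cons x t ih =>
    intro as bs
    have h := ih (as ++ [(pvND shares x).1]) (bs ++ [(pvND shares x).2])
    exact h.trans (by simp)


lemma pvB_prefix (D : List Int) : ∀ (u : List Int) (c : Int),
    D.foldl (fun (pr : List Int) d =>
        pr ++ [PySem.Int.mod (PySem.List.pyGetD pr (-1) 0 * d) pvP]) (u ++ [c])
      = (u ++ [c]) ++ pvPres c D := by
  induction D with
  | nil => intro u c; simp [pvPres]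
  | cons d ds ih =>
    intro u c
    rw [List.foldl_cons, PySem.List.pyGetD_neg_one_append_singleton, pvmodP]
    have := ih (u ++ [c]) ((c * d) % pvP)
    rw [this]
    simp [pvPres]

lemma pvPres_getLast : ∀ (D : List Int) (c : Int) (h : (c :: pvPres c D) ≠ []),
    (c :: pvPres c D).getLast h = pvPI c D := by
  intro D
  induction D with
  | nil => intro c h; simp [pvPres, pvPI]
  | cons d ds ih =>
    intro c h
    show ((c :: ((c * d) % pvP) :: pvPres ((c * d) % pvP) ds).getLast (by simp)) = _
    rw [List.getLast_cons (by simp)]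
    exact ih ((c * d) % pvP) (by simp)

lemma pvLast (D : List Int) (c : Int) :
    PySem.List.pyGetD (c :: pvPres c D) (-1) 0 = pvPI c D := by
  rw [PySem.List.pyGetD_neg_one _ _ (by simp)]
  exact pvPres_getLast D c (by simp)

lemma pvZip_quad : ∀ (q : List ((Int × Int) × Int × Int)) (c : Int),
    ((q.map (fun x => x.1)).zip (q.map (fun x => x.2.1))).zip
        ((q.map (fun x => x.2.2)).zip (c :: pvPres c (q.map (fun x => x.2.2))))
      = pvQuad c q := by
  intro q
  induction q with
  | nil => intro c; simp [pvQuad]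
  | cons x t ih =>
    intro c
    simp only [List.map_cons, pvPres, pvQuad, List.zip_cons_cons]
    rw [ih ((c * x.2.2) % pvP)]

lemma pvPI_nonneg (D : List Int) : ∀ c : Int, 0 ≤ c → 0 ≤ pvPI c D := by
  induction D with
  | nil => intro c hc; exact hc
  | cons d ds ih =>
    intro c hc
    exact ih _ (Int.emod_nonneg _ (by norm_num [pvP]))

lemma pvPI_nondvd (D : List Int) : ∀ c : Int, ¬ pvP ∣ c → (∀ d ∈ D, ¬ pvP ∣ d) →
    ¬ pvP ∣ pvPI c D := by
  induction D with
  | nil => intro c hc _; exact hc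
  | cons d ds ih =>
    intro c hc hd
    refine ih _ ?_ (fun x hx => hd x (List.mem_cons_of_mem _ hx))
    rw [pvdvd_emod]
    exact pv_nondvd_mul hc (hd d List.mem_cons_self)

lemma pvB_back : ∀ (q : List ((Int × Int) × Int × Int)) (c invT s : Int),
    ¬ pvP ∣ c →
    (∀ x ∈ q, 0 ≤ x.2.2 ∧ x.2.2 < pvP ∧ ¬ pvP ∣ x.2.2) →
    0 ≤ invT → invT < pvP →
    (pvPI c (q.map (fun x => x.2.2)) * invT) % pvP = 1 →
    ∃ r1, ((pvQuad c q).reverse.foldl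
        (fun (st : Int × Int) q' =>
          let invden := PySem.Int.mod (st.1 * q'.2.2) pvP
          (PySem.Int.mod (st.1 * q'.2.1) pvP,
           PySem.Int.mod (st.2 + q'.1.1.2 * q'.1.2 * invden) pvP))
        (invT, s))
      = (r1, (q.map pvTermOf).reverse.foldl (fun a t => (a + t) % pvP) s)
      ∧ 0 ≤ r1 ∧ r1 < pvP ∧ (c * r1) % pvP = 1 := by
  intro q
  induction q with
  | nil =>
    intro c invT s hc _ h0 h1 hpi
    exact ⟨invT, rfl, h0, h1, hpi⟩
  | cons x t ih =>
    intro c invT s hc hq h0 h1 hpi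
    have hx := hq x List.mem_cons_self
    have hc' : ¬ pvP ∣ (c * x.2.2) % pvP := by
      rw [pvdvd_emod]; exact pv_nondvd_mul hc hx.2.2
    obtain ⟨r1, hr, hr0, hr1, hrinv⟩ :=
      ih ((c * x.2.2) % pvP) invT s hc'
        (fun y hy => hq y (List.mem_cons_of_mem _ hy)) h0 h1 hpi
    -- the witnessed inverse of this denominator
    obtain ⟨v, hv, hv0, hv1, hvinv⟩ := pvModInverse_spec x.2.2 hx.1 hx.2.2
    refine ⟨(r1 * x.2.2) % pvP, ?_, Int.emod_nonneg _ (by norm_num [pvP]),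
      Int.emod_lt_of_pos _ pvP_pos, ?_⟩
    · show ((pvQuad c (x :: t)).reverse.foldl _ (invT, s)) = _
      rw [show pvQuad c (x :: t)
          = ((x.1, x.2.1), (x.2.2, c)) :: pvQuad ((c * x.2.2) % pvP) t from rfl,
        List.reverse_cons, List.foldl_append, hr]
      have hinvden : (r1 * c) % pvP = pvInvVal x.2.2 := by
        have hu : (x.2.2 * ((r1 * c) % pvP)) % pvP = 1 := by
          rw [pvmulmod_right, show x.2.2 * (r1 * c) = (c * x.2.2) * r1 by ring,
            ← pvmulmod_left]
          exact hrinv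
        have hval : pvInvVal x.2.2 = v := by rw [pvInvVal, hv]; rfl
        rw [hval]
        exact pvInv_unique x.2.2 _ v (Int.emod_nonneg _ (by norm_num [pvP]))
          (Int.emod_lt_of_pos _ pvP_pos) hv0 hv1 hu hvinv
      rw [List.foldl_cons, List.foldl_nil]
      dsimp only
      simp only [pvmodP]
      rw [hinvden, List.map_cons, List.reverse_cons, List.foldl_append, List.foldl_cons,
        List.foldl_nil,
        show pvTermOf x = (x.1.2 * x.2.1 * pvInvVal x.2.2) % pvP from rfl, pvaddmod_right]
    · rw [pvmulmod_right, show c * (r1 * x.2.2) = (c * x.2.2) * r1 by ring, ← pvmulmod_left]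
      exact hrinv


lemma pv_not_dvd_one : ¬ pvP ∣ (1 : Int) := by
  intro h
  have := Int.le_of_dvd one_pos h
  norm_num [pvP] at this

lemma pvZip_quad' (shares : List (Int × Int)) (l : List (Int × (Int × Int))) (c : Int) :
    ((l.map (fun iv => iv.2)).zip (l.map (fun iv => (pvND shares iv).1))).zip
        ((l.map (fun iv => (pvND shares iv).2)).zip
          (c :: pvPres c (l.map (fun iv => (pvND shares iv).2))))
      = pvQuad c (l.map (fun iv => (iv.2, ((pvND shares iv).1, (pvND shares iv).2)))) := by
  have h := pvZip_quad (l.map (fun iv => (iv.2, ((pvND shares iv).1, (pvND shares iv).2)))) c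
  simpa [List.map_map, Function.comp] using h

lemma pvB_total (shares : List (Int × Int)) (hne : ¬ shares = [])
    (hnd : ∀ iv ∈ PySem.List.enumerate shares 0,
      0 ≤ (pvND shares iv).2 ∧ (pvND shares iv).2 < pvP ∧ ¬ pvP ∣ (pvND shares iv).2) :
    shamir_reconstruct_alt shares
      = ((PySem.List.enumerate shares 0).map (pvTerm shares)).sum % pvP := by
  have hbuild := pvB_build shares (PySem.List.enumerate shares 0) [] []
  simp only [List.nil_append] at hbuild
  have hpre := pvB_prefix ((PySem.List.enumerate shares 0).map (fun iv => (pvND shares iv).2)) [] 1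
  simp only [List.nil_append, List.singleton_append] at hpre
  have hlast := pvLast ((PySem.List.enumerate shares 0).map (fun iv => (pvND shares iv).2)) 1
  have hPInn : 0 ≤ pvPI 1 ((PySem.List.enumerate shares 0).map (fun iv => (pvND shares iv).2)) :=
    pvPI_nonneg _ 1 (by norm_num)
  have hPIcop : ¬ pvP ∣ pvPI 1 ((PySem.List.enumerate shares 0).map (fun iv => (pvND shares iv).2)) :=
    pvPI_nondvd _ 1 pv_not_dvd_one
      (fun d hd => by obtain ⟨iv, hiv, rfl⟩ := List.mem_map.mp hd; exact (hnd iv hiv).2.2)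
  obtain ⟨invT, hv, hv0, hv1, hvinv⟩ := pvModInverseB_spec _ hPInn hPIcop
  unfold shamir_reconstruct_alt
  rw [if_neg hne]
  dsimp only
  rw [hbuild]
  dsimp only
  rw [hpre, hlast, hv]
  dsimp only
  -- rewrite the zipped lists into pvQuad form
  have hshares : shares.zip ((PySem.List.enumerate shares 0).map (fun iv => (pvND shares iv).1))
      = ((PySem.List.enumerate shares 0).map (fun iv => iv.2)).zip
          ((PySem.List.enumerate shares 0).map (fun iv => (pvND shares iv).1)) := by
    rw [PySem.List.map_snd_enumerate]
  rw [hshares, pvZip_quad']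
  obtain ⟨r1, hfold, _, _, _⟩ := pvB_back
    ((PySem.List.enumerate shares 0).map (fun iv => (iv.2, ((pvND shares iv).1, (pvND shares iv).2))))
    1 invT 0 pv_not_dvd_one
    (fun x hx => by
      obtain ⟨iv, hiv, rfl⟩ := List.mem_map.mp hx
      exact ⟨(hnd iv hiv).1, (hnd iv hiv).2.1, (hnd iv hiv).2.2⟩)
    hv0 hv1
    (by
      have hmm : ((PySem.List.enumerate shares 0).map
            (fun iv => (iv.2, ((pvND shares iv).1, (pvND shares iv).2)))).map (fun x => x.2.2)
          = (PySem.List.enumerate shares 0).map (fun iv => (pvND shares iv).2) := by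
        simp [List.map_map, Function.comp]
      rw [hmm]
      exact hvinv)
  rw [hfold]
  dsimp only
  have hterms : ((PySem.List.enumerate shares 0).map
        (fun iv => (iv.2, ((pvND shares iv).1, (pvND shares iv).2)))).map pvTermOf
      = (PySem.List.enumerate shares 0).map (pvTerm shares) := by
    simp [List.map_map, Function.comp, pvTermOf, pvTerm]
  rw [hterms, show (0:Int) = 0 % pvP from by norm_num, pvfoldl_madd, List.sum_reverse]
  norm_num

-- ===== VERDICT (by name: the statement is the Claim_ definition above) =====
theorem shamir_reconstruct_spec : Claim_equal_shamir_reconstruct := by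
  intro shares hdom hpre
  obtain ⟨hne, hnodup⟩ := hpre
  have hfac := pv_factors shares hdom hnodup
  have hnd : ∀ iv ∈ PySem.List.enumerate shares 0,
      0 ≤ (pvND shares iv).2 ∧ (pvND shares iv).2 < pvP ∧ ¬ pvP ∣ (pvND shares iv).2 :=
    fun iv hiv => pvND_props shares iv (fun jv hjv => hfac iv hiv jv hjv)
  show shamir_reconstruct shares = shamir_reconstruct_alt shares
  rw [pvA_total shares hne hnd, pvB_total shares hne hnd]
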